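-- pv_equiv track=rewrite | github.com/momstouch/programming | programmers/high_score_kit/heap_spicy.py | solution
-- ===== SOURCE A (Python) =====
-- def solution(scoville, K):
--     cnt = 0
--
--     scoville.sort()
--
--     while len(scoville) >= 2 and scoville[0] < K:
--         s = scoville.pop(1)
--         scoville[0] += s * 2
--
--         scoville.sort()
--         cnt += 1
--
--     if scoville and scoville[0] > K:
--         return cnt
--     else:
--         return -1
-- ===== SOURCE B (Python) =====
-- def solution(scoville, K):
--     # No sorting at all: keep an unsorted bag and extract the two smallest
--     # values by linear min-scans each round. (A sorts the caller's list in
--     # place; B leaves it untouched — the return value is the same.)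
--     bag = list(scoville)
--     cnt = 0
--     while len(bag) >= 2:
--         m = min(bag)
--         if m >= K:
--             break
--         bag.remove(m)
--         m2 = min(bag)
--         bag.remove(m2)
--         bag.append(m + m2 * 2)
--         cnt += 1
--     if bag and min(bag) > K:
--         return cnt
--     return -1
-- ===== Notes on version B (the rewrite author's own statement) =====
-- stated objective: alternative
-- what changed: B never sorts: it keeps an unsorted bag and extracts the two smallest values each round with linear min-scans (min + remove), where A maintains a sorted list by re-sorting the whole list every iteration (B also does not mutate the caller's list; the proof carries the invariant that the bag stays a permutation of A's sorted list).
import Mathlib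
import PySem

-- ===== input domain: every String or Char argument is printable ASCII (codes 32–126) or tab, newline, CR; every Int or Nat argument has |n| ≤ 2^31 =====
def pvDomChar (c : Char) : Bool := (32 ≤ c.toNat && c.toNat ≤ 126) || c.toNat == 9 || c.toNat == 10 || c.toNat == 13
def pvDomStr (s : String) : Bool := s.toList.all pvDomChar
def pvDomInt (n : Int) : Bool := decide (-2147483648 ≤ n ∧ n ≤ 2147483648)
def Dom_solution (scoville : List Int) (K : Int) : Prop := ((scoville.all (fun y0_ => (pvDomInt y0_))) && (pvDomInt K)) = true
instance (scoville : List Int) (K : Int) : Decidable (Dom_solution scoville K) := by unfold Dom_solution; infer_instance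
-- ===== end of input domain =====

-- B drops sorting entirely: it keeps an unsorted bag and extracts the two smallest values by
-- linear min-scans each round, where A re-sorts the whole list every iteration; return values
-- are proved equal (A sorts/pops the caller's list in place, B does not — return value only).


-- ===== PORT A =====
-- final 'if scoville and scoville[0] > K: return cnt else: return -1'
def solutionFin (scoville : List Int) (K : Int) (cnt : Int) : Int :=
  match scoville with
  | a :: _ => if a > K then cnt else -1
  | [] => -1

-- the while loop: s = pop index 1, add s*2 into index 0, re-sort the whole list, count
def solutionLoop (K : Int) : List Int → Int → Int
  | a :: s :: rest, cnt =>
    if a < K then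
      solutionLoop K (PySem.List.sorted ((a + s * 2) :: rest) (fun x => x) false) (cnt + 1)
    else solutionFin (a :: s :: rest) K cnt
  | l, cnt => solutionFin l K cnt
  termination_by l _ => l.length
  decreasing_by simp [PySem.List.length_sorted]

def solution (scoville : List Int) (K : Int) : Int :=
  solutionLoop K (PySem.List.sorted scoville (fun x => x) false) 0

-- ===== PORT B =====
-- 'return cnt if bag and min(bag) > K else -1'
def altFin (bag : List Int) (K : Int) (cnt : Int) : Int :=
  match PySem.List.min? bag (fun x => x) with
  | some m => if m > K then cnt else -1
  | none => -1

-- length bookkeeping for a successful list.remove (cited by altLoop's termination proof)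
theorem pvRemoveLen {bag bag1 : List Int} {m : Int}
    (h : PySem.List.remove? bag m = some bag1) : bag1.length + 1 = bag.length := by
  have hm : m ∈ bag := by
    by_contra hm
    rw [(PySem.List.remove?_eq_none_iff bag m).mpr hm] at h
    simp at h
  rw [PySem.List.remove?_eq_some_erase bag m hm] at h
  cases h
  have := List.length_erase_of_mem hm
  have : 1 ≤ bag.length := List.length_pos_of_mem hm
  omega

-- the while loop: m = min(bag); break if m >= K; remove m; m2 = min(bag); remove m2;
-- append m + m2*2.  The 'none' branches are unreachable (min of a list of length ≥ 2,
-- removal of a value min? just returned as a member).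
def altLoop (K : Int) : List Int → Int → Int
  | bag, cnt =>
    if _h2 : 2 ≤ bag.length then
      match PySem.List.min? bag (fun x => x) with
      | some m =>
        if m ≥ K then altFin bag K cnt
        else
          match h1 : PySem.List.remove? bag m with
          | some bag1 =>
            match PySem.List.min? bag1 (fun x => x) with
            | some m2 =>
              match h3 : PySem.List.remove? bag1 m2 with
              | some bag2 => altLoop K (bag2 ++ [m + m2 * 2]) (cnt + 1)
              | none => -1
            | none => -1
          | none => -1
      | none => -1
    else altFin bag K cnt
  termination_by bag _ => bag.length
  decreasing_by
    have e1 := pvRemoveLen h1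
    have e3 := pvRemoveLen h3
    simp; omega

def solution_alt (scoville : List Int) (K : Int) : Int :=
  altLoop K scoville 0

-- ===== PRECONDITION & SPEC =====
def Spec_solution (scoville : List Int) (K : Int) (out : Int) : Prop := out = solution_alt scoville K
instance (scoville : List Int) (K : Int) (out : Int) : Decidable (Spec_solution scoville K out) := by unfold Spec_solution; infer_instance

-- ===== CLAIM (what is proved, stated in full; the proofs are below) =====
def Claim_equal_solution : Prop := ∀ (scoville : List Int) (K : Int), Dom_solution scoville K → Spec_solution scoville K (solution scoville K)

-- ===== LEMMAS AND PROOFS =====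

-- the minimum of any permutation of a ≤-sorted list a :: t is a
theorem min?_of_perm_sorted {bag : List Int} {a : Int} {t : List Int}
    (hperm : bag.Perm (a :: t)) (hs : (a :: t).Pairwise (· ≤ ·)) :
    PySem.List.min? bag (fun x => x) = some a := by
  match hm : PySem.List.min? bag (fun x => x) with
  | none =>
    have : bag = [] := (PySem.List.min?_eq_none_iff bag (fun x => x)).mp hm
    subst this
    exact absurd hperm.symm (by simp)
  | some m =>
    have hmem : m ∈ bag := PySem.List.min?_mem hm
    have hmin := PySem.List.min?_isMin hm
    have hma : m ≤ a := hmin a (hperm.mem_iff.mpr (by simp))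
    have ham : a ≤ m := by
      have := hperm.mem_iff.mp hmem
      rcases List.mem_cons.mp this with rfl | hmt
      · rfl
      · exact (List.pairwise_cons.mp hs).1 m hmt
    exact congrArg some (le_antisymm hma ham)

theorem remove?_of_perm_cons {bag : List Int} {a : Int} {t : List Int}
    (hperm : bag.Perm (a :: t)) :
    ∃ bag1, PySem.List.remove? bag a = some bag1 ∧ bag1.Perm t := by
  have hmem : a ∈ bag := hperm.mem_iff.mpr (by simp)
  refine ⟨bag.erase a, PySem.List.remove?_eq_some_erase bag a hmem, ?_⟩
  have := hperm.erase a
  simpa using this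

-- the loop invariant: B's unsorted bag is a permutation of A's sorted working list
theorem loop_eq (K : Int) : ∀ (n : Nat) (s bag : List Int), s.length ≤ n →
    s.Pairwise (· ≤ ·) → bag.Perm s → ∀ cnt, solutionLoop K s cnt = altLoop K bag cnt := by
  intro n
  induction n with
  | zero =>
    intro s bag hn _ hperm cnt
    have hs : s = [] := List.length_eq_zero_iff.mp (Nat.le_zero.mp hn)
    subst hs
    have hb : bag = [] := hperm.eq_nil
    subst hb
    simp [solutionLoop, altLoop, solutionFin, altFin, PySem.List.min?]
  | succ nm ih =>
    intro s bag hn hp hperm cnt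
    match s with
    | [] =>
      have hb : bag = [] := hperm.eq_nil
      subst hb
      simp [solutionLoop, altLoop, solutionFin, altFin, PySem.List.min?]
    | [a] =>
      have hb : bag = [a] := List.Perm.eq_singleton hperm
      subst hb
      rw [solutionLoop, altLoop]
      simp [solutionFin, altFin, PySem.List.min?]
      intro _ _ _ h
      simp at h
    | a :: b :: rest =>
      have hlen : bag.length = rest.length + 2 := by simpa using hperm.length_eq
      have hminbag := min?_of_perm_sorted hperm hp
      rw [solutionLoop, altLoop, dif_pos (by omega : 2 ≤ bag.length), hminbag]
      simp only
      by_cases hK : a < K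
      · rw [if_pos hK, if_neg (by omega : ¬ a ≥ K)]
        obtain ⟨bag1, hr1, hperm1⟩ := remove?_of_perm_cons hperm
        rw [hr1]
        have hp1 : (b :: rest).Pairwise (· ≤ ·) := (List.pairwise_cons.mp hp).2
        have hmin1 := min?_of_perm_sorted hperm1 hp1
        obtain ⟨bag2, hr2, hperm2⟩ := remove?_of_perm_cons hperm1
        simp only [hmin1]
        rw [hr2]
        simp only
        apply ih
        · have := PySem.List.length_sorted ((a + b * 2) :: rest) (fun x => x) false
          simp at hn ⊢
          omega
        · simpa using PySem.List.sorted_pairwise ((a + b * 2) :: rest) (fun x => x)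
        · refine (List.Perm.trans List.perm_append_comm (List.Perm.cons _ hperm2)).trans ?_
          exact (PySem.List.sorted_perm ((a + b * 2) :: rest) (fun x => x) false).symm
      · rw [if_neg hK, if_pos (by omega : a ≥ K)]
        simp [solutionFin, altFin, hminbag]

-- ===== VERDICT (by name: the statement is the Claim_ definition above) =====
theorem solution_spec : Claim_equal_solution := by
  intro scoville K _
  unfold Spec_solution solution solution_alt
  exact loop_eq K scoville.length (PySem.List.sorted scoville (fun x => x) false) scoville
    (by simp [PySem.List.length_sorted])
    (by simpa using PySem.List.sorted_pairwise scoville (fun x => x))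
    (PySem.List.sorted_perm scoville (fun x => x) false).symm 0
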